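-- pv_equiv track=rewrite | github.com/gabriellaec/desoft-analise-exercicios | backup/user_125/ch130_2020_04_01_18_00_10_699021.py | monta_mala
-- ===== SOURCE A (Python) =====
-- def monta_mala(listapeso):
--     m=0
--     soma=0
--     lista=[]
--     while m<len(listapeso):
--         soma+=listapeso[m]
--         if soma <= 23:
--             lista.append(listapeso[m])
--             m+=1
--         else:
--             m+=1
--             return lista
-- ===== SOURCE B (Python) =====
-- def monta_mala(listapeso):
--     # build the prefix-sum table first, then find the first index where it
--     # exceeds 23 and return the slice before it
--     prefs = []
--     t = 0
--     for x in listapeso: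
--         t += x
--         prefs.append(t)
--     for i, s in enumerate(prefs):
--         if s > 23:
--             return listapeso[:i]
--     return None
-- ===== Notes on version B (the rewrite author's own statement) =====
-- stated objective: alternative
-- what changed: Replaces the interleaved accumulate-and-append while-loop with a two-phase shape: build the full prefix-sum table, then scan it for the first sum exceeding 23 and return the corresponding slice of the input.
-- outside the precondition, e.g. on monta_mala([1, 2]): A returns None, B returns None
import Mathlib
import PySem

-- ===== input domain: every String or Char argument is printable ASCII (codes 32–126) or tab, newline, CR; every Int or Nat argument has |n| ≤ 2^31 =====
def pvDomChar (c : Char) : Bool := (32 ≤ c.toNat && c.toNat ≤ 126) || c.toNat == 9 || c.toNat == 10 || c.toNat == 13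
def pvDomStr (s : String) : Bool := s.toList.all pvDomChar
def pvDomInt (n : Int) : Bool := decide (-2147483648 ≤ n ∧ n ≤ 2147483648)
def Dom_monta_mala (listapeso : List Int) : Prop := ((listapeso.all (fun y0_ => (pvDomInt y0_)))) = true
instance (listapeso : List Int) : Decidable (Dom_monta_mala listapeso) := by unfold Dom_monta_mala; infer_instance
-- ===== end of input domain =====

-- B replaces A's interleaved accumulate-and-append loop by a prefix-sum table followed
-- by a first-exceeding-index scan and a slice (alternative decomposition, same cost).
-- Equivalence is about the returned list; Pre_ excludes the fall-through where the
-- Python returns None (no prefix sum ever exceeds 23).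

-- ===== PORT A =====
-- while loop of A: soma accumulates, elements are appended while soma ≤ 23;
-- on the first overflow the collected list is returned; falling off the end is
-- Python's implicit None, modelled as Option.none here.
def montaLoopA : List Int → Int → Option (List Int)
  | [], _ => none
  | x :: xs, soma =>
    let s := soma + x
    if s ≤ 23 then (montaLoopA xs s).map (fun l => x :: l) else some []

def monta_mala (listapeso : List Int) : List Int :=
  (montaLoopA listapeso 0).getD []  -- the none (Python None) case is excluded by Pre_

-- ===== PORT B =====
-- prefix-sum table (first pass of Source B)
def pscanB : List Int → Int → List Int
  | [], _ => []
  | x :: xs, t => (t + x) :: pscanB xs (t + x)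

def monta_mala_alt (listapeso : List Int) : List Int :=
  match (pscanB listapeso 0).findIdx? (fun s => 23 < s) with
  | some i => listapeso.take i
  | none => []  -- the Python None case, excluded by Pre_

-- ===== PRECONDITION & SPEC =====
-- Pre_ excludes the inputs (including []) where no prefix sum exceeds 23, on which
-- the Python function falls through and returns None instead of a list.
def Pre_monta_mala (listapeso : List Int) : Prop :=
  ((List.range listapeso.length).any (fun i => 23 < (listapeso.take (i + 1)).sum)) = true
instance (listapeso : List Int) : Decidable (Pre_monta_mala listapeso) := by
  unfold Pre_monta_mala; infer_instance
def pvWitness_monta_mala : List Int := [10, 10, 10]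
def Spec_monta_mala (listapeso : List Int) (out : List Int) : Prop := out = monta_mala_alt listapeso
instance (listapeso : List Int) (out : List Int) : Decidable (Spec_monta_mala listapeso out) := by unfold Spec_monta_mala; infer_instance

-- ===== CLAIM (what is proved, stated in full; the proofs are below) =====
def Claim_equal_monta_mala : Prop := ∀ (listapeso : List Int), Dom_monta_mala listapeso → Pre_monta_mala listapeso → Spec_monta_mala listapeso (monta_mala listapeso)

-- ===== LEMMAS AND PROOFS =====

-- A's loop equals "first index of the (offset) prefix-sum table exceeding 23, take that many"
theorem montaLoopA_eq_find (xs : List Int) : ∀ soma : Int,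
    montaLoopA xs soma =
      ((pscanB xs soma).findIdx? (fun s => 23 < s)).map (fun i => xs.take i) := by
  induction xs with
  | nil => intro soma; simp [montaLoopA, pscanB]
  | cons x xs ih =>
    intro soma
    simp only [montaLoopA, pscanB, List.findIdx?_cons]
    by_cases h : soma + x ≤ 23
    · have hp : (fun s => decide (23 < s)) (soma + x) = false := by
        simp [h]
      simp only [if_pos h, hp, ih (soma + x)]
      cases (pscanB xs (soma + x)).findIdx? (fun s => 23 < s) with
      | none => simp
      | some i => simp [List.take_succ_cons]
    · have h' : 23 < soma + x := by omega
      have hp : (fun s => decide (23 < s)) (soma + x) = true := by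
        simp [h']
      simp [if_neg h, hp]

theorem monta_mala_spec : Claim_equal_monta_mala := by
  intro listapeso _ _
  unfold Spec_monta_mala monta_mala monta_mala_alt
  rw [montaLoopA_eq_find]
  cases (pscanB listapeso 0).findIdx? (fun s => 23 < s) with
  | none => simp
  | some i => simp
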